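-- pv_equiv track=rewrite | github.com/Swayam2706/signalforge | et_backend/services/yahoo_finance_service.py | search_indian
-- ===== SOURCE A (Python) =====
-- from typing import Optional, Dict, Any, List
--
-- INDIAN_STOCKS = [
--     {"symbol": "RELIANCE.NS", "display": "RELIANCE", "name": "Reliance Industries", "exchange": "NSE", "sector": "Energy"},
--     {"symbol": "TCS.NS", "display": "TCS", "name": "Tata Consultancy Services", "exchange": "NSE", "sector": "IT"},
--     {"symbol": "HDFCBANK.NS", "display": "HDFCBANK", "name": "HDFC Bank", "exchange": "NSE", "sector": "Banking"},
--     {"symbol": "INFY.NS", "display": "INFY", "name": "Infosys", "exchange": "NSE", "sector": "IT"},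
--     {"symbol": "HINDUNILVR.NS", "display": "HINDUNILVR", "name": "Hindustan Unilever", "exchange": "NSE", "sector": "FMCG"},
--     {"symbol": "ICICIBANK.NS", "display": "ICICIBANK", "name": "ICICI Bank", "exchange": "NSE", "sector": "Banking"},
--     {"symbol": "KOTAKBANK.NS", "display": "KOTAKBANK", "name": "Kotak Mahindra Bank", "exchange": "NSE", "sector": "Banking"},
--     {"symbol": "SBIN.NS", "display": "SBIN", "name": "State Bank of India", "exchange": "NSE", "sector": "Banking"},
--     {"symbol": "BAJFINANCE.NS", "display": "BAJFINANCE", "name": "Bajaj Finance", "exchange": "NSE", "sector": "Finance"},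
--     {"symbol": "BHARTIARTL.NS", "display": "BHARTIARTL", "name": "Bharti Airtel", "exchange": "NSE", "sector": "Telecom"},
--     {"symbol": "ITC.NS", "display": "ITC", "name": "ITC Limited", "exchange": "NSE", "sector": "FMCG"},
--     {"symbol": "LT.NS", "display": "LT", "name": "Larsen & Toubro", "exchange": "NSE", "sector": "Infrastructure"},
--     {"symbol": "WIPRO.NS", "display": "WIPRO", "name": "Wipro", "exchange": "NSE", "sector": "IT"},
--     {"symbol": "HCLTECH.NS", "display": "HCLTECH", "name": "HCL Technologies", "exchange": "NSE", "sector": "IT"},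
--     {"symbol": "AXISBANK.NS", "display": "AXISBANK", "name": "Axis Bank", "exchange": "NSE", "sector": "Banking"},
--     {"symbol": "MARUTI.NS", "display": "MARUTI", "name": "Maruti Suzuki", "exchange": "NSE", "sector": "Auto"},
--     {"symbol": "SUNPHARMA.NS", "display": "SUNPHARMA", "name": "Sun Pharmaceutical", "exchange": "NSE", "sector": "Pharma"},
--     {"symbol": "TATAMOTORS.NS", "display": "TATAMOTORS", "name": "Tata Motors", "exchange": "NSE", "sector": "Auto"},
--     {"symbol": "TATASTEEL.NS", "display": "TATASTEEL", "name": "Tata Steel", "exchange": "NSE", "sector": "Metals"},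
--     {"symbol": "ADANIENT.NS", "display": "ADANIENT", "name": "Adani Enterprises", "exchange": "NSE", "sector": "Conglomerate"},
--     {"symbol": "ONGC.NS", "display": "ONGC", "name": "Oil and Natural Gas Corp", "exchange": "NSE", "sector": "Energy"},
--     {"symbol": "NTPC.NS", "display": "NTPC", "name": "NTPC Limited", "exchange": "NSE", "sector": "Power"},
--     {"symbol": "POWERGRID.NS", "display": "POWERGRID", "name": "Power Grid Corporation", "exchange": "NSE", "sector": "Power"},
--     {"symbol": "ULTRACEMCO.NS", "display": "ULTRACEMCO", "name": "UltraTech Cement", "exchange": "NSE", "sector": "Cement"},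
--     {"symbol": "BAJAJFINSV.NS", "display": "BAJAJFINSV", "name": "Bajaj Finserv", "exchange": "NSE", "sector": "Finance"},
--     {"symbol": "TECHM.NS", "display": "TECHM", "name": "Tech Mahindra", "exchange": "NSE", "sector": "IT"},
--     {"symbol": "ASIANPAINT.NS", "display": "ASIANPAINT", "name": "Asian Paints", "exchange": "NSE", "sector": "Paints"},
--     {"symbol": "NESTLEIND.NS", "display": "NESTLEIND", "name": "Nestle India", "exchange": "NSE", "sector": "FMCG"},
--     {"symbol": "DRREDDY.NS", "display": "DRREDDY", "name": "Dr Reddy's Laboratories", "exchange": "NSE", "sector": "Pharma"},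
--     {"symbol": "CIPLA.NS", "display": "CIPLA", "name": "Cipla", "exchange": "NSE", "sector": "Pharma"},
-- ]
--
-- def search_indian(query: str) -> List[Dict]:
--     """Search Indian stocks by name or symbol."""
--     q = query.upper().strip()
--     matches = []
--     for s in INDIAN_STOCKS:
--         sym = s["display"].upper()
--         name = s["name"].upper()
--         if sym == q or sym.startswith(q) or q in sym or q in name:
--             matches.append({
--                 "symbol": s["display"],
--                 "yfinanceSymbol": s["symbol"],
--                 "name": s["name"],
--                 "exchange": s["exchange"],
--                 "sector": s["sector"],
--                 "provider": "yahoo",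
--             })
--     # Sort: exact > prefix > contains
--     def key(x):
--         sym = x["symbol"]
--         if sym == q: return 0
--         if sym.startswith(q): return 1
--         return 2
--     matches.sort(key=key)
--     return matches[:8]
-- ===== SOURCE B (Python) =====
-- from typing import Dict, List
--
-- # Static table kept compact as pipe-delimited lines, parsed once:
-- # each row is [symbol, display, name, exchange, sector].
-- LINES = [
--     'RELIANCE.NS|RELIANCE|Reliance Industries|NSE|Energy',
--     'TCS.NS|TCS|Tata Consultancy Services|NSE|IT',
--     'HDFCBANK.NS|HDFCBANK|HDFC Bank|NSE|Banking',
--     'INFY.NS|INFY|Infosys|NSE|IT',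
--     'HINDUNILVR.NS|HINDUNILVR|Hindustan Unilever|NSE|FMCG',
--     'ICICIBANK.NS|ICICIBANK|ICICI Bank|NSE|Banking',
--     'KOTAKBANK.NS|KOTAKBANK|Kotak Mahindra Bank|NSE|Banking',
--     'SBIN.NS|SBIN|State Bank of India|NSE|Banking',
--     'BAJFINANCE.NS|BAJFINANCE|Bajaj Finance|NSE|Finance',
--     'BHARTIARTL.NS|BHARTIARTL|Bharti Airtel|NSE|Telecom',
--     'ITC.NS|ITC|ITC Limited|NSE|FMCG',
--     'LT.NS|LT|Larsen & Toubro|NSE|Infrastructure',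
--     'WIPRO.NS|WIPRO|Wipro|NSE|IT',
--     'HCLTECH.NS|HCLTECH|HCL Technologies|NSE|IT',
--     'AXISBANK.NS|AXISBANK|Axis Bank|NSE|Banking',
--     'MARUTI.NS|MARUTI|Maruti Suzuki|NSE|Auto',
--     'SUNPHARMA.NS|SUNPHARMA|Sun Pharmaceutical|NSE|Pharma',
--     'TATAMOTORS.NS|TATAMOTORS|Tata Motors|NSE|Auto',
--     'TATASTEEL.NS|TATASTEEL|Tata Steel|NSE|Metals',
--     'ADANIENT.NS|ADANIENT|Adani Enterprises|NSE|Conglomerate',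
--     'ONGC.NS|ONGC|Oil and Natural Gas Corp|NSE|Energy',
--     'NTPC.NS|NTPC|NTPC Limited|NSE|Power',
--     'POWERGRID.NS|POWERGRID|Power Grid Corporation|NSE|Power',
--     'ULTRACEMCO.NS|ULTRACEMCO|UltraTech Cement|NSE|Cement',
--     'BAJAJFINSV.NS|BAJAJFINSV|Bajaj Finserv|NSE|Finance',
--     'TECHM.NS|TECHM|Tech Mahindra|NSE|IT',
--     'ASIANPAINT.NS|ASIANPAINT|Asian Paints|NSE|Paints',
--     'NESTLEIND.NS|NESTLEIND|Nestle India|NSE|FMCG',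
--     "DRREDDY.NS|DRREDDY|Dr Reddy's Laboratories|NSE|Pharma",
--     'CIPLA.NS|CIPLA|Cipla|NSE|Pharma',
-- ]
--
-- ROWS = [line.split("|") for line in LINES]
--
--
-- def _fmt(r: List[str]) -> Dict[str, str]:
--     return {
--         "symbol": r[1],
--         "yfinanceSymbol": r[0],
--         "name": r[2],
--         "exchange": r[3],
--         "sector": r[4],
--         "provider": "yahoo",
--     }
--
--
-- def search_indian(query: str) -> List[Dict]:
--     """Search Indian stocks by name or symbol.
--
--     Counting-sort by rank via three staged passes (exact / proper prefix /
--     contains) over the parsed table; no sort call needed."""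
--     q = query.upper().strip()
--
--     def hit(r):
--         return q in r[1].upper() or q in r[2].upper()
--
--     exact = [_fmt(r) for r in ROWS if hit(r) and r[1].upper() == q]
--     prefix = [_fmt(r) for r in ROWS
--               if hit(r) and r[1].upper() != q and r[1].upper().startswith(q)]
--     rest = [_fmt(r) for r in ROWS if hit(r) and not r[1].upper().startswith(q)]
--     return (exact + prefix + rest)[:8]
-- ===== Notes on version B (the rewrite author's own statement) =====
-- stated objective: alternative
-- what changed: B stores the table as compact pipe-delimited line strings parsed once, and replaces A's match-then-stable-sort-by-rank with three staged filter passes (exact, proper prefix, contains) whose concatenation is truncated to 8 — a counting sort by rank with no sort call and the redundant disjuncts of the match test dropped.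
import Mathlib
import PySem

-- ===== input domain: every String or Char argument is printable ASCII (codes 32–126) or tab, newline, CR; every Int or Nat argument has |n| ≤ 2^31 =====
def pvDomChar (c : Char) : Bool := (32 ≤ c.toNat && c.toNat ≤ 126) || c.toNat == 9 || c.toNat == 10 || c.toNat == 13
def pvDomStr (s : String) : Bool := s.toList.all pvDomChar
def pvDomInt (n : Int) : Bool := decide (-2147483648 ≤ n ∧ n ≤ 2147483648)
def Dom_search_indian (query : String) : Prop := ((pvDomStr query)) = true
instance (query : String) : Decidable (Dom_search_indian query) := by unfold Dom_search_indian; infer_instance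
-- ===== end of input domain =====

-- B replaces A's match-then-stable-sort-by-rank with three staged filter passes
-- (exact / proper prefix / contains) over a compact pipe-delimited table parsed once.

-- ===== PORT A =====
-- A's module constant INDIAN_STOCKS, as (symbol, display, name, exchange, sector)
abbrev Stock : Type := String × String × String × String × String

def indianStocks : List Stock := [
  ("RELIANCE.NS", "RELIANCE", "Reliance Industries", "NSE", "Energy"),
  ("TCS.NS", "TCS", "Tata Consultancy Services", "NSE", "IT"),
  ("HDFCBANK.NS", "HDFCBANK", "HDFC Bank", "NSE", "Banking"),
  ("INFY.NS", "INFY", "Infosys", "NSE", "IT"),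
  ("HINDUNILVR.NS", "HINDUNILVR", "Hindustan Unilever", "NSE", "FMCG"),
  ("ICICIBANK.NS", "ICICIBANK", "ICICI Bank", "NSE", "Banking"),
  ("KOTAKBANK.NS", "KOTAKBANK", "Kotak Mahindra Bank", "NSE", "Banking"),
  ("SBIN.NS", "SBIN", "State Bank of India", "NSE", "Banking"),
  ("BAJFINANCE.NS", "BAJFINANCE", "Bajaj Finance", "NSE", "Finance"),
  ("BHARTIARTL.NS", "BHARTIARTL", "Bharti Airtel", "NSE", "Telecom"),
  ("ITC.NS", "ITC", "ITC Limited", "NSE", "FMCG"),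
  ("LT.NS", "LT", "Larsen & Toubro", "NSE", "Infrastructure"),
  ("WIPRO.NS", "WIPRO", "Wipro", "NSE", "IT"),
  ("HCLTECH.NS", "HCLTECH", "HCL Technologies", "NSE", "IT"),
  ("AXISBANK.NS", "AXISBANK", "Axis Bank", "NSE", "Banking"),
  ("MARUTI.NS", "MARUTI", "Maruti Suzuki", "NSE", "Auto"),
  ("SUNPHARMA.NS", "SUNPHARMA", "Sun Pharmaceutical", "NSE", "Pharma"),
  ("TATAMOTORS.NS", "TATAMOTORS", "Tata Motors", "NSE", "Auto"),
  ("TATASTEEL.NS", "TATASTEEL", "Tata Steel", "NSE", "Metals"),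
  ("ADANIENT.NS", "ADANIENT", "Adani Enterprises", "NSE", "Conglomerate"),
  ("ONGC.NS", "ONGC", "Oil and Natural Gas Corp", "NSE", "Energy"),
  ("NTPC.NS", "NTPC", "NTPC Limited", "NSE", "Power"),
  ("POWERGRID.NS", "POWERGRID", "Power Grid Corporation", "NSE", "Power"),
  ("ULTRACEMCO.NS", "ULTRACEMCO", "UltraTech Cement", "NSE", "Cement"),
  ("BAJAJFINSV.NS", "BAJAJFINSV", "Bajaj Finserv", "NSE", "Finance"),
  ("TECHM.NS", "TECHM", "Tech Mahindra", "NSE", "IT"),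
  ("ASIANPAINT.NS", "ASIANPAINT", "Asian Paints", "NSE", "Paints"),
  ("NESTLEIND.NS", "NESTLEIND", "Nestle India", "NSE", "FMCG"),
  ("DRREDDY.NS", "DRREDDY", "Dr Reddy's Laboratories", "NSE", "Pharma"),
  ("CIPLA.NS", "CIPLA", "Cipla", "NSE", "Pharma")]

-- the dict A appends for a match
def aItem (s : Stock) : List (String × String) :=
  [("symbol", s.2.1), ("yfinanceSymbol", s.1), ("name", s.2.2.1),
   ("exchange", s.2.2.2.1), ("sector", s.2.2.2.2), ("provider", "yahoo")]

-- A's match test: sym == q or sym.startswith(q) or q in sym or q in name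
def aCond (q : String) (s : Stock) : Bool :=
  (PySem.Str.upper s.2.1 == q) || PySem.Str.startswith (PySem.Str.upper s.2.1) q ||
    PySem.Str.isIn q (PySem.Str.upper s.2.1) || PySem.Str.isIn q (PySem.Str.upper s.2.2.1)

-- A's sort key; x["symbol"] cannot raise (every dict A builds carries the key), ported as first-match lookup
def aKey (q : String) (x : List (String × String)) : Int :=
  let sym := (x.lookup "symbol").getD ""
  if sym == q then 0 else if PySem.Str.startswith sym q then 1 else 2

def search_indian (query : String) : List (List (String × String)) :=
  let q := PySem.Str.strip (PySem.Str.upper query)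
  let matched := indianStocks.foldl (fun acc s => if aCond q s then acc ++ [aItem s] else acc) []
  PySem.List.slice (PySem.List.sorted matched (aKey q) false) none (some 8)

-- ===== PORT B =====
-- B's LINES constant: the same table as pipe-delimited lines, parsed once
def bLines : List String := [
  "RELIANCE.NS|RELIANCE|Reliance Industries|NSE|Energy",
  "TCS.NS|TCS|Tata Consultancy Services|NSE|IT",
  "HDFCBANK.NS|HDFCBANK|HDFC Bank|NSE|Banking",
  "INFY.NS|INFY|Infosys|NSE|IT",
  "HINDUNILVR.NS|HINDUNILVR|Hindustan Unilever|NSE|FMCG",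
  "ICICIBANK.NS|ICICIBANK|ICICI Bank|NSE|Banking",
  "KOTAKBANK.NS|KOTAKBANK|Kotak Mahindra Bank|NSE|Banking",
  "SBIN.NS|SBIN|State Bank of India|NSE|Banking",
  "BAJFINANCE.NS|BAJFINANCE|Bajaj Finance|NSE|Finance",
  "BHARTIARTL.NS|BHARTIARTL|Bharti Airtel|NSE|Telecom",
  "ITC.NS|ITC|ITC Limited|NSE|FMCG",
  "LT.NS|LT|Larsen & Toubro|NSE|Infrastructure",
  "WIPRO.NS|WIPRO|Wipro|NSE|IT",
  "HCLTECH.NS|HCLTECH|HCL Technologies|NSE|IT",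
  "AXISBANK.NS|AXISBANK|Axis Bank|NSE|Banking",
  "MARUTI.NS|MARUTI|Maruti Suzuki|NSE|Auto",
  "SUNPHARMA.NS|SUNPHARMA|Sun Pharmaceutical|NSE|Pharma",
  "TATAMOTORS.NS|TATAMOTORS|Tata Motors|NSE|Auto",
  "TATASTEEL.NS|TATASTEEL|Tata Steel|NSE|Metals",
  "ADANIENT.NS|ADANIENT|Adani Enterprises|NSE|Conglomerate",
  "ONGC.NS|ONGC|Oil and Natural Gas Corp|NSE|Energy",
  "NTPC.NS|NTPC|NTPC Limited|NSE|Power",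
  "POWERGRID.NS|POWERGRID|Power Grid Corporation|NSE|Power",
  "ULTRACEMCO.NS|ULTRACEMCO|UltraTech Cement|NSE|Cement",
  "BAJAJFINSV.NS|BAJAJFINSV|Bajaj Finserv|NSE|Finance",
  "TECHM.NS|TECHM|Tech Mahindra|NSE|IT",
  "ASIANPAINT.NS|ASIANPAINT|Asian Paints|NSE|Paints",
  "NESTLEIND.NS|NESTLEIND|Nestle India|NSE|FMCG",
  "DRREDDY.NS|DRREDDY|Dr Reddy's Laboratories|NSE|Pharma",
  "CIPLA.NS|CIPLA|Cipla|NSE|Pharma"]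

-- ROWS = [line.split("|") for line in LINES]; split? is none only for sep = "", so getD [] never fires
def bRows : List (List String) :=
  bLines.map (fun line => (PySem.Str.split? line "|").getD [])

-- r[i]; every row of the constant table has 5 fields, so Python's r[i] never raises here
def bGet (r : List String) (i : Nat) : String := (PySem.List.pyGet? r (i : Int)).getD ""

def fmtB (r : List String) : List (String × String) :=
  [("symbol", bGet r 1), ("yfinanceSymbol", bGet r 0), ("name", bGet r 2),
   ("exchange", bGet r 3), ("sector", bGet r 4), ("provider", "yahoo")]

-- hit(r): q in r[1].upper() or q in r[2].upper()
def bHit (q : String) (r : List String) : Bool :=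
  PySem.Str.isIn q (PySem.Str.upper (bGet r 1)) || PySem.Str.isIn q (PySem.Str.upper (bGet r 2))

def search_indian_alt (query : String) : List (List (String × String)) :=
  let q := PySem.Str.strip (PySem.Str.upper query)
  let exact := (bRows.filter (fun r => bHit q r && (PySem.Str.upper (bGet r 1) == q))).map fmtB
  let pre := (bRows.filter (fun r => bHit q r && !(PySem.Str.upper (bGet r 1) == q) &&
      PySem.Str.startswith (PySem.Str.upper (bGet r 1)) q)).map fmtB
  let rest := (bRows.filter (fun r => bHit q r &&
      !PySem.Str.startswith (PySem.Str.upper (bGet r 1)) q)).map fmtB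
  PySem.List.slice (exact ++ pre ++ rest) none (some 8)

-- ===== PRECONDITION & SPEC =====
def Spec_search_indian (query : String) (out : List (List (String × String))) : Prop := out = search_indian_alt query
instance (query : String) (out : List (List (String × String))) : Decidable (Spec_search_indian query out) := by unfold Spec_search_indian; infer_instance

-- ===== CLAIM =====
def Claim_equal_search_indian : Prop := ∀ (query : String), Dom_search_indian query → Spec_search_indian query (search_indian query)

-- ===== LEMMAS AND PROOFS =====

-- proof-side abbreviations: A's match test and rank as predicates on the stock tuple
def bCond (q : String) (s : Stock) : Bool :=
  PySem.Str.isIn q (PySem.Str.upper s.2.1) || PySem.Str.isIn q (PySem.Str.upper s.2.2.1)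

def bRank (q : String) (s : Stock) : Int :=
  if PySem.Str.upper s.2.1 == q then 0
  else if PySem.Str.startswith (PySem.Str.upper s.2.1) q then 1 else 2

-- the stock tuple a parsed row denotes
def pack (r : List String) : Stock := (bGet r 0, bGet r 1, bGet r 2, bGet r 3, bGet r 4)

set_option maxRecDepth 40000 in
set_option maxHeartbeats 2000000 in
theorem rows_pack : indianStocks = bRows.map pack := by decide

theorem startswith_isIn (s q : List Char) (h : PySem.Chars.startswith s q = true) :
    PySem.Chars.isIn q s = true := by
  rw [PySem.Chars.isIn_iff_infix]
  exact ((PySem.Chars.startswith_iff _ _).1 h).isInfix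

theorem startswith_self (s : String) : PySem.Str.startswith s s = true := by
  rw [PySem.Str.startswith_eq, PySem.Chars.startswith_iff]

theorem aCond_eq_bCond (q : String) (s : Stock) : aCond q s = bCond q s := by
  unfold aCond bCond
  simp only [PySem.Str.isIn_eq, PySem.Str.startswith_eq]
  by_cases hc : PySem.Chars.isIn q.toList (PySem.Chars.upper s.2.1.toList) = true
  · simp [hc]
  · have hb : PySem.Chars.startswith (PySem.Chars.upper s.2.1.toList) q.toList = false := by
      by_contra h
      exact hc (startswith_isIn _ _ (by simpa using h))
    have ha : (PySem.Str.upper s.2.1 == q) = false := by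
      by_contra h
      have heq : PySem.Str.upper s.2.1 = q := by simpa using h
      have : PySem.Chars.startswith (PySem.Chars.upper s.2.1.toList) q.toList = true := by
        have hpre : q.toList <+: (PySem.Str.upper s.2.1).toList := heq ▸ List.prefix_rfl
        rw [PySem.Chars.startswith_iff]
        simpa using hpre
      rw [this] at hb
      exact absurd hb (by simp)
    simp [ha, hb, hc]

theorem aKey_aItem (q : String) (s : Stock) (h : PySem.Str.upper s.2.1 = s.2.1) :
    aKey q (aItem s) = bRank q s := by
  simp only [aKey, aItem, bRank, List.lookup, h]
  rfl

theorem upper_display (s : Stock) (hs : s ∈ indianStocks) :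
    PySem.Str.upper s.2.1 = s.2.1 := by
  fin_cases hs <;> rfl

-- the three values of bRank, as the Boolean tests B uses
theorem rank0 (q : String) (s : Stock) :
    (bRank q s == 0) = (PySem.Str.upper s.2.1 == q) := by
  unfold bRank
  split_ifs with h0 h1 <;> simp [h0]

theorem rank1 (q : String) (s : Stock) :
    (bRank q s == 1)
      = (!(PySem.Str.upper s.2.1 == q) && PySem.Str.startswith (PySem.Str.upper s.2.1) q) := by
  unfold bRank
  split_ifs with h0 h1
  · simp [h0]
  · rw [h1]; simp [h0]
  · have h1' : PySem.Str.startswith (PySem.Str.upper s.2.1) q = false := by simpa using h1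
    rw [h1']; simp

theorem rank2 (q : String) (s : Stock) :
    (bRank q s == 2) = (!PySem.Str.startswith (PySem.Str.upper s.2.1) q) := by
  unfold bRank
  split_ifs with h0 h1
  · have heq : PySem.Str.upper s.2.1 = q := by simpa using h0
    rw [show PySem.Str.startswith (PySem.Str.upper s.2.1) q = true by
      rw [heq]; exact startswith_self q]
    simp
  · rw [h1]; simp
  · have h1' : PySem.Str.startswith (PySem.Str.upper s.2.1) q = false := by simpa using h1
    rw [h1']; simp

-- insertBy walks past a block no element of which triggers `before`
theorem insertBy_skip {α : Type} (before : α → α → Bool) (x : α) (l1 l2 : List α)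
    (h : ∀ y ∈ l1, before x y = false) :
    PySem.List.insertBy before x (l1 ++ l2) = l1 ++ PySem.List.insertBy before x l2 := by
  induction l1 with
  | nil => simp
  | cons a t ih =>
      simp only [List.cons_append, PySem.List.insertBy, h a List.mem_cons_self,
        Bool.false_eq_true, if_false]
      exact congrArg (a :: ·) (ih fun y hy => h y (List.mem_cons_of_mem a hy))

theorem insertBy_front {α : Type} (before : α → α → Bool) (x : α) (l : List α)
    (h : ∀ y ∈ l, before x y = true) :
    PySem.List.insertBy before x l = x :: l := by
  cases l with
  | nil => rfl
  | cons a t => simp [PySem.List.insertBy, h a List.mem_cons_self]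

-- the stable insertion-sort loop with a {0,1,2}-valued key maintains three buckets
theorem buckets {α : Type} (k : α → Int) (L : List α) (b0 b1 b2 : List α)
    (h0 : ∀ y ∈ b0, k y = 0) (h1 : ∀ y ∈ b1, k y = 1) (h2 : ∀ y ∈ b2, k y = 2)
    (hL : ∀ x ∈ L, k x = 0 ∨ k x = 1 ∨ k x = 2) :
    L.foldl (fun acc x => PySem.List.insertBy (fun a b => decide (k a < k b)) x acc)
        (b0 ++ (b1 ++ b2))
      = (b0 ++ L.filter (fun x => k x == 0)) ++
        ((b1 ++ L.filter (fun x => k x == 1)) ++ (b2 ++ L.filter (fun x => k x == 2))) := by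
  induction L generalizing b0 b1 b2 with
  | nil => simp
  | cons x t ih =>
      have hx := hL x List.mem_cons_self
      have ht : ∀ y ∈ t, k y = 0 ∨ k y = 1 ∨ k y = 2 :=
        fun y hy => hL y (List.mem_cons_of_mem x hy)
      rcases hx with hx | hx | hx
      · have hins : PySem.List.insertBy (fun a b => decide (k a < k b)) x (b0 ++ (b1 ++ b2))
            = (b0 ++ [x]) ++ (b1 ++ b2) := by
          rw [insertBy_skip _ _ _ _ (fun y hy => by simp [hx, h0 y hy]),
            insertBy_front _ _ _ (fun y hy => by
              rcases List.mem_append.1 hy with hy | hy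
              · simp [hx, h1 y hy]
              · simp [hx, h2 y hy])]
          simp
        rw [List.foldl_cons, hins,
          ih (b0 ++ [x]) b1 b2
            (fun y hy => by rcases List.mem_append.1 hy with hy | hy
                            · exact h0 y hy
                            · simpa [List.mem_singleton.1 hy] using hx) h1 h2 ht]
        simp [hx, List.append_assoc]
      · have hins : PySem.List.insertBy (fun a b => decide (k a < k b)) x (b0 ++ (b1 ++ b2))
            = b0 ++ ((b1 ++ [x]) ++ b2) := by
          rw [insertBy_skip _ _ _ _ (fun y hy => by simp [hx, h0 y hy]),
            insertBy_skip _ _ _ _ (fun y hy => by simp [hx, h1 y hy]),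
            insertBy_front _ _ _ (fun y hy => by simp [hx, h2 y hy])]
          simp
        rw [List.foldl_cons, hins,
          ih b0 (b1 ++ [x]) b2 h0
            (fun y hy => by rcases List.mem_append.1 hy with hy | hy
                            · exact h1 y hy
                            · simpa [List.mem_singleton.1 hy] using hx) h2 ht]
        simp [hx, List.append_assoc]
      · have hins : PySem.List.insertBy (fun a b => decide (k a < k b)) x (b0 ++ (b1 ++ b2))
            = b0 ++ (b1 ++ (b2 ++ [x])) := by
          rw [PySem.List.insertBy_of_forall_not_before _ _ _ (fun y hy => by
            rcases List.mem_append.1 hy with hy | hy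
            · simp [hx, h0 y hy]
            · rcases List.mem_append.1 hy with hy | hy
              · simp [hx, h1 y hy]
              · simp [hx, h2 y hy])]
          simp
        rw [List.foldl_cons, hins,
          ih b0 b1 (b2 ++ [x]) h0 h1
            (fun y hy => by rcases List.mem_append.1 hy with hy | hy
                            · exact h2 y hy
                            · simpa [List.mem_singleton.1 hy] using hx) ht]
        simp [hx, List.append_assoc]

theorem sorted3 {α : Type} (k : α → Int) (M : List α)
    (h : ∀ x ∈ M, k x = 0 ∨ k x = 1 ∨ k x = 2) :
    PySem.List.sorted M k false
      = M.filter (fun x => k x == 0) ++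
        (M.filter (fun x => k x == 1) ++ M.filter (fun x => k x == 2)) := by
  rw [PySem.List.sorted_eq_foldl_insertBy]
  have := buckets k M [] [] [] (by simp) (by simp) (by simp) h
  simpa [List.append_assoc] using this

-- the key A assigns to an emitted dict lies in {0,1,2}
theorem aKey_range (q : String) (x : List (String × String)) :
    aKey q x = 0 ∨ aKey q x = 1 ∨ aKey q x = 2 := by
  unfold aKey
  dsimp only
  split_ifs <;> simp

-- ===== VERDICT (by name: the statement is the Claim_ definition above) =====
theorem search_indian_spec : Claim_equal_search_indian := by
  intro query _
  unfold Spec_search_indian search_indian search_indian_alt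
  dsimp only
  set q := PySem.Str.strip (PySem.Str.upper query) with hq
  rw [PySem.List.foldl_append_if (aCond q) aItem indianStocks []]
  rw [sorted3 (aKey q) _ (fun x _ => aKey_range q x)]
  simp only [List.nil_append]
  -- A's three sorted segments are filters of the table by rank
  have hfil : ∀ i : Int,
      (List.map aItem (indianStocks.filter (aCond q))).filter (fun x => aKey q x == i)
        = (indianStocks.filter (fun s => bCond q s && (bRank q s == i))).map aItem := by
    intro i
    rw [List.filter_map, List.filter_filter]
    refine congrArg (List.map aItem) (List.filter_congr ?_)
    intro s hs
    rw [Function.comp_apply, aKey_aItem q s (upper_display s hs), aCond_eq_bCond,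
      Bool.and_comm]
  rw [hfil 0, hfil 1, hfil 2]
  -- pull the filters back through the parsed rows
  rw [rows_pack]
  simp only [List.filter_map, List.map_map]
  rw [show (aItem ∘ pack) = fmtB from rfl]
  have e0 : ((fun s => bCond q s && (bRank q s == 0)) ∘ pack)
      = (fun r => bHit q r && (PySem.Str.upper (bGet r 1) == q)) :=
    funext fun r => by rw [Function.comp_apply, rank0]; rfl
  have e1 : ((fun s => bCond q s && (bRank q s == 1)) ∘ pack)
      = (fun r => bHit q r && !(PySem.Str.upper (bGet r 1) == q) &&
            PySem.Str.startswith (PySem.Str.upper (bGet r 1)) q) :=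
    funext fun r => by rw [Function.comp_apply, rank1, ← Bool.and_assoc]; rfl
  have e2 : ((fun s => bCond q s && (bRank q s == 2)) ∘ pack)
      = (fun r => bHit q r && !PySem.Str.startswith (PySem.Str.upper (bGet r 1)) q) :=
    funext fun r => by rw [Function.comp_apply, rank2]; rfl
  rw [e0, e1, e2]
  simp [List.append_assoc]
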